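-- pv_equiv track=rewrite | github.com/qldrh112/algorithm | coding_test/naver/naver1.py | solution
-- ===== SOURCE A (Python) =====
-- def solution(planted, watered):
--     answer = []
--
--     water_period = planted[:]
--     watered = list(map(lambda x: x - 1, watered))
--     n = len(planted)
--     bad_mood = [False] * n
--
--     for choice in watered:
--         tmp = n
--         # 식물을 순회하며 기분을 조정한다.
--         for i in range(n):
--             # 이미 기분이 좋지 않은 식물
--             if bad_mood[i]:
--                 tmp -= 1
--             # 지금 물을 준 식물
--             elif i == choice:
--                 planted[i] = water_period[i]
--             # 상해버린 식물
--             elif planted[i] == 1: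
--                 bad_mood[i] = True
--                 tmp -= 1
--             else:
--                 planted[i] -= 1
--         answer.append(tmp)
--
--     return answer
-- ===== SOURCE B (Python) =====
-- def solution(planted, watered):
--     # Per-plant death-step computation instead of step-by-step simulation.
--     # (Unlike A, this does not mutate `planted`; return value is identical.)
--     n = len(planted)
--     m = len(watered)
--     # death[i] = first step at which plant i is counted as spoiled; m = never within the m steps.
--     # A plant with period < 1 keeps decrementing past 1 and never spoils.
--     death = [p - 1 if p >= 1 else m for p in planted]
--     for t, w in enumerate(watered):
--         i = w - 1
--         if 0 <= i < n and planted[i] >= 1 and t <= death[i]: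
--             death[i] = t + planted[i]
--     deaths_at = [0] * (m + 1)
--     for d in death:
--         deaths_at[min(d, m)] += 1
--     answer = []
--     alive = n
--     for t in range(m):
--         alive -= deaths_at[t]
--         answer.append(alive)
--     return answer
-- ===== Notes on version B (the rewrite author's own statement) =====
-- stated objective: faster
-- what changed: B replaces A's step-by-step simulation of every plant at every watering with a per-plant death-step computation (one pass over the waterings updating each plant's death step, then bucket counts and a prefix scan), O(n+m) instead of O(n*m); B does not mutate `planted` (return value identical).
import Mathlib
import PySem

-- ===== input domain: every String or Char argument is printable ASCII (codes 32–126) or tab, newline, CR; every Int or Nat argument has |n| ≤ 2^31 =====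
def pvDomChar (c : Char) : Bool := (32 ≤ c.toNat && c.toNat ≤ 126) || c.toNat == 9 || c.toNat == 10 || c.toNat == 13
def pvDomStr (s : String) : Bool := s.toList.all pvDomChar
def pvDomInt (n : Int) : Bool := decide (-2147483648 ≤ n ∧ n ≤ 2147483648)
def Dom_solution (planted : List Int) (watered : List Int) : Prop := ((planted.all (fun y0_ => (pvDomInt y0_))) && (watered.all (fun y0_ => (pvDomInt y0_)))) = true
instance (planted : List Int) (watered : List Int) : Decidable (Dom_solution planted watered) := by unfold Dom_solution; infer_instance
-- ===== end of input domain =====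

-- B replaces A's O(n*m) per-step simulation by an O(n+m) per-plant death-step computation
-- (equality of RETURN values; A mutates `planted` in place, B does not).

-- ===== PORT A =====
-- A's inner 'for i in range(n)' loop touches only index i of planted/bad_mood in each
-- iteration, so it is ported as simultaneous structural recursion over
-- water_period/planted/bad_mood; it returns the updated lists and the number of
-- 'tmp -= 1' decrements, so that tmp at the end of the loop is n - decrements.
def stepA (choice : Int) (i : Int) : List Int → List Int → List Bool → List Int × List Bool × Int
  | w :: ws, p :: ps, b :: bs =>
    let r := stepA choice (i + 1) ws ps bs
    if b then (p :: r.1, b :: r.2.1, r.2.2 + 1)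
    else if i = choice then (w :: r.1, b :: r.2.1, r.2.2)
    else if p = 1 then (p :: r.1, true :: r.2.1, r.2.2 + 1)
    else ((p - 1) :: r.1, b :: r.2.1, r.2.2)
  | _, _, _ => ([], [], 0)

-- 'for choice in watered: … answer.append(tmp)'
def loopA (n : Int) (wp : List Int) : List Int → List Int → List Bool → List Int
  | [], _, _ => []
  | c :: cs, ps, bs =>
    let r := stepA c 0 wp ps bs
    (n - r.2.2) :: loopA n wp cs r.1 r.2.1

def solution (planted : List Int) (watered : List Int) : List Int :=
  let water_period := planted
  let watered' := watered.map (fun x => x - 1)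
  let n := planted.length
  let bad_mood := List.replicate n false
  loopA (n : Int) water_period watered' planted bad_mood

-- ===== PORT B =====
-- B's final 'for t in range(m)' loop reads deaths_at[0..m-1] in order:
-- ported as structural recursion on that prefix.
def scanB (alive : Int) : List Int → List Int
  | [] => []
  | c :: cnts => (alive - c) :: scanB (alive - c) cnts

def solution_alt (planted : List Int) (watered : List Int) : List Int :=
  let n := planted.length
  let m := watered.length
  -- death = [p - 1 if p >= 1 else m for p in planted]
  let death0 := planted.map (fun p => if 1 ≤ p then p - 1 else (m : Int))
  -- for t, w in enumerate(watered): …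
  let death := (PySem.List.enumerate watered).foldl (fun death tw =>
      let i := tw.2 - 1
      if 0 ≤ i ∧ i < (n : Int) ∧ 1 ≤ PySem.List.pyGetD planted i 0 ∧ tw.1 ≤ PySem.List.pyGetD death i 0
      then PySem.List.pySetD death i (tw.1 + PySem.List.pyGetD planted i 0)
      else death) death0
  -- for d in death: deaths_at[min(d, m)] += 1
  let deaths_at := death.foldl (fun bk d =>
      PySem.List.pySetD bk (min d (m : Int)) (PySem.List.pyGetD bk (min d (m : Int)) 0 + 1))
      (List.replicate (m + 1) (0 : Int))
  scanB (n : Int) (deaths_at.take m)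

-- ===== PRECONDITION & SPEC =====
def Spec_solution (planted : List Int) (watered : List Int) (out : List Int) : Prop := out = solution_alt planted watered
instance (planted : List Int) (watered : List Int) (out : List Int) : Decidable (Spec_solution planted watered out) := by unfold Spec_solution; infer_instance

-- ===== CLAIM (what is proved, stated in full; the proofs are below) =====
def Claim_equal_solution : Prop := ∀ (planted : List Int) (watered : List Int), Dom_solution planted watered → Spec_solution planted watered (solution planted watered)

-- ===== LEMMAS AND PROOFS =====

-- For the plant at index i with watering period w and current counter v (not yet spoiled),
-- dieV i w cs v = the 0-based step within the remaining 0-based choices cs at which it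
-- spoils, none if it survives all of cs.
def dieV (i w : Int) : List Int → Int → Option Int
  | [], _ => none
  | c :: cs, v =>
    if i = c then (dieV i w cs w).map (· + 1)
    else if v = 1 then some 0
    else (dieV i w cs (v - 1)).map (· + 1)

def deadBy (o : Option Int) (t : Int) : Bool :=
  match o with
  | some d => decide (d ≤ t)
  | none => false

-- Number of cells A's simulation counts as spoiled at step t (i = index of the first cell).
def cntDead (cs : List Int) (t : Int) : Int → List Int → List Int → List Bool → Int
  | i, w :: ws, p :: ps, b :: bs =>
    (if b || deadBy (dieV i w cs p) t then 1 else 0) + cntDead cs t (i + 1) ws ps bs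
  | _, _, _, _ => 0

-- Steps (counted from s) at which plant j is watered.
def timesFrom (j : Int) : Int → List Int → List Int
  | _, [] => []
  | s, w :: ws => (if w - 1 = j then [s] else []) ++ timesFrom j (s + 1) ws

-- B's death-step update, folded over the watering times of one plant.
def foldD (w : Int) : List Int → Int → Int
  | [], d => d
  | t :: ts, d => foldD w ts (if t ≤ d then t + w else d)

-- The death list B's watering pass produces, described per plant.
def deathSpec (ws : List Int) (m : Int) : Int → List Int → List Int
  | _, [] => []
  | i, p :: ps => (if 1 ≤ p then foldD p (timesFrom i 0 ws) (p - 1) else m) :: deathSpec ws m (i + 1) ps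

def cntLe (t : Int) : List Int → Int
  | [] => 0
  | d :: ds => (if d ≤ t then 1 else 0) + cntLe t ds

theorem dieV_nonneg (i w : Int) : ∀ (cs : List Int) (v d : Int), dieV i w cs v = some d → 0 ≤ d := by
  intro cs
  induction cs with
  | nil => intro v d h; simp [dieV] at h
  | cons c cs ih =>
    intro v d h
    simp only [dieV] at h
    split_ifs at h with h1 h2
    · rcases Option.map_eq_some_iff.mp h with ⟨d', hd', rfl⟩
      have := ih _ _ hd'; omega
    · simp at h; omega
    · rcases Option.map_eq_some_iff.mp h with ⟨d', hd', rfl⟩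
      have := ih _ _ hd'; omega

theorem deadBy_map (o : Option Int) (t : Int) : deadBy (o.map (· + 1)) t = deadBy o (t - 1) := by
  cases o with
  | none => rfl
  | some d => simp only [Option.map_some, deadBy, decide_eq_decide]; omega

theorem deadBy_dieV_neg (i w : Int) (cs : List Int) (v t : Int) (ht : t < 0) :
    deadBy (dieV i w cs v) t = false := by
  cases h : dieV i w cs v with
  | none => rfl
  | some d => have := dieV_nonneg i w cs v d h; simp [deadBy]; omega

theorem stepA_cnt0 (c : Int) (cs : List Int) :
    ∀ (wp ps : List Int) (bs : List Bool) (i : Int),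
      (stepA c i wp ps bs).2.2 = cntDead (c :: cs) 0 i wp ps bs := by
  intro wp
  induction wp with
  | nil => intro ps bs i; simp [stepA, cntDead]
  | cons w ws ih =>
    intro ps bs i
    cases ps with
    | nil => simp [stepA, cntDead]
    | cons p ps =>
      cases bs with
      | nil => simp [stepA, cntDead]
      | cons b bs =>
        cases b with
        | true => simp [stepA, cntDead, ih ps bs (i + 1)]; ring
        | false =>
          by_cases hic : i = c
          · subst hic
            have hd : deadBy (Option.map (· + 1) (dieV i w cs w)) 0 = false := by
              rw [deadBy_map]; exact deadBy_dieV_neg _ _ _ _ _ (by norm_num)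
            simp [stepA, cntDead, dieV, hd, ih ps bs (i + 1)]
          · by_cases hp : p = 1
            · simp [stepA, cntDead, dieV, hic, hp, deadBy, ih ps bs (i + 1)]; ring
            · have hd : deadBy (Option.map (· + 1) (dieV i w cs (p - 1))) 0 = false := by
                rw [deadBy_map]; exact deadBy_dieV_neg _ _ _ _ _ (by norm_num)
              simp [stepA, cntDead, dieV, hic, hp, hd, ih ps bs (i + 1)]

theorem stepA_cnt_succ (c : Int) (cs : List Int) (t : Int) (ht : 0 ≤ t) :
    ∀ (wp ps : List Int) (bs : List Bool) (i : Int),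
      cntDead (c :: cs) (t + 1) i wp ps bs
        = cntDead cs t i wp (stepA c i wp ps bs).1 (stepA c i wp ps bs).2.1 := by
  intro wp
  induction wp with
  | nil => intro ps bs i; simp [cntDead]
  | cons w ws ih =>
    intro ps bs i
    cases ps with
    | nil => simp [stepA, cntDead]
    | cons p ps =>
      cases bs with
      | nil => simp [stepA, cntDead]
      | cons b bs =>
        cases b with
        | true => simp [stepA, cntDead, ih ps bs (i + 1)]
        | false =>
          by_cases hic : i = c
          · subst hic
            have hd : deadBy (Option.map (· + 1) (dieV i w cs w)) (t + 1)
                = deadBy (dieV i w cs w) t := by rw [deadBy_map]; norm_num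
            simp [stepA, cntDead, dieV, hd, ih ps bs (i + 1)]
          · by_cases hp : p = 1
            · have h0 : deadBy (some 0) (t + 1) = true := by
                simp [deadBy]; omega
              simp [stepA, cntDead, dieV, hic, hp, h0, ih ps bs (i + 1)]
            · have hd : deadBy (Option.map (· + 1) (dieV i w cs (p - 1))) (t + 1)
                = deadBy (dieV i w cs (p - 1)) t := by rw [deadBy_map]; norm_num
              simp [stepA, cntDead, dieV, hic, hp, hd, ih ps bs (i + 1)]

theorem loopA_spec (n : Int) (wp : List Int) :
    ∀ (cs ps : List Int) (bs : List Bool),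
      loopA n wp cs ps bs
        = (List.range cs.length).map (fun (t : Nat) => n - cntDead cs (t : Int) 0 wp ps bs) := by
  intro cs
  induction cs with
  | nil => intro ps bs; simp [loopA]
  | cons c cs ih =>
    intro ps bs
    simp only [loopA, List.length_cons, List.range_succ_eq_map, List.map_cons, List.map_map]
    congr 1
    · push_cast
      rw [stepA_cnt0 c cs wp ps bs 0]
    · rw [ih]
      apply List.map_congr_left
      intro t _
      simp only [Function.comp_apply]
      rw [show ((t + 1 : Nat) : Int) = (t : Int) + 1 by push_cast; ring,
        stepA_cnt_succ c cs (t : Int) (by positivity)]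

theorem solution_eq (planted watered : List Int) :
    solution planted watered
      = (List.range watered.length).map (fun (t : Nat) =>
          ((planted.length : Int)) - cntDead (watered.map (fun x => x - 1)) (t : Int) 0
            planted planted (List.replicate planted.length false)) := by
  simp only [solution]
  rw [loopA_spec]
  simp

theorem timesFrom_shift (j : Int) : ∀ (ws : List Int) (s : Int),
    timesFrom j (s + 1) ws = (timesFrom j s ws).map (· + 1) := by
  intro ws
  induction ws with
  | nil => intro s; simp [timesFrom]
  | cons w ws ih =>
    intro s
    simp only [timesFrom, List.map_append]
    congr 1
    · split_ifs <;> simp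
    · rw [ih (s + 1)]

theorem timesFrom_ge (j : Int) : ∀ (ws : List Int) (s t : Int), t ∈ timesFrom j s ws → s ≤ t := by
  intro ws
  induction ws with
  | nil => intro s t h; simp [timesFrom] at h
  | cons w ws ih =>
    intro s t h
    simp only [timesFrom, List.mem_append] at h
    rcases h with h | h
    · split_ifs at h <;> simp at h; omega
    · have := ih (s + 1) t h; omega

theorem foldD_shift (w : Int) : ∀ (T : List Int) (d : Int),
    foldD w (T.map (· + 1)) d = foldD w T (d - 1) + 1 := by
  intro T
  induction T with
  | nil => intro d; simp [foldD]
  | cons t ts ih =>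
    intro d
    simp only [List.map_cons, foldD]
    rw [ih]
    have h : (if t + 1 ≤ d then t + 1 + w else d) - 1 = if t ≤ d - 1 then t + w else d - 1 := by
      split_ifs <;> omega
    rw [h]

theorem foldD_stay (w : Int) : ∀ (T : List Int) (d : Int), d < 0 → (∀ t ∈ T, 0 ≤ t) →
    foldD w T d = d := by
  intro T
  induction T with
  | nil => intro d _ _; rfl
  | cons t ts ih =>
    intro d hd hT
    have h0 : 0 ≤ t := hT t (by simp)
    simp only [foldD]
    rw [if_neg (by omega)]
    exact ih d hd (fun x hx => hT x (by simp [hx]))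

theorem foldD_nonneg (w : Int) (hw : 1 ≤ w) : ∀ (T : List Int) (d : Int), 0 ≤ d → (∀ t ∈ T, 0 ≤ t) →
    0 ≤ foldD w T d := by
  intro T
  induction T with
  | nil => intro d hd _; exact hd
  | cons t ts ih =>
    intro d hd hT
    have h0 : 0 ≤ t := hT t (by simp)
    simp only [foldD]
    refine ih _ ?_ (fun x hx => hT x (by simp [hx]))
    split_ifs <;> omega

theorem dieV_none (j w : Int) (hw : w ≤ 0) : ∀ (cs : List Int) (v : Int), v ≤ 0 →
    dieV j w cs v = none := by
  intro cs
  induction cs with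
  | nil => intro v _; rfl
  | cons c cs ih =>
    intro v hv
    simp only [dieV]
    split_ifs with h1 h2
    · rw [ih w hw]; rfl
    · omega
    · rw [ih (v - 1) (by omega)]; rfl

theorem dieV_foldD (j w : Int) (hw : 1 ≤ w) : ∀ (ws : List Int) (v : Int), 1 ≤ v →
    dieV j w (ws.map (fun x => x - 1)) v
      = (if foldD w (timesFrom j 0 ws) (v - 1) < (ws.length : Int)
         then some (foldD w (timesFrom j 0 ws) (v - 1)) else none) := by
  intro ws
  induction ws with
  | nil => intro v hv; simp [dieV, timesFrom, foldD]; omega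
  | cons w0 ws ih =>
    intro v hv
    have hge : ∀ t ∈ timesFrom j 0 ws, (0 : Int) ≤ t := fun t ht => timesFrom_ge j ws 0 t ht
    simp only [List.map_cons, dieV, timesFrom, List.length_cons]
    rw [timesFrom_shift j ws 0]
    by_cases hj : j = w0 - 1
    · rw [if_pos hj, if_pos hj.symm, ih w hw]
      simp only [List.cons_append, List.nil_append, foldD]
      rw [if_pos (by omega : (0 : Int) ≤ v - 1), show (0 : Int) + w = w by ring, foldD_shift]
      push_cast
      by_cases hD : foldD w (timesFrom j 0 ws) (w - 1) < (ws.length : Int)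
      · rw [if_pos hD, if_pos (by omega)]; rfl
      · rw [if_neg hD, if_neg (by omega)]; rfl
    · rw [if_neg hj,
        show (if w0 - 1 = j then [(0 : Int)] else []) = [] from if_neg (fun h => hj h.symm)]
      simp only [List.nil_append]
      by_cases hv1 : v = 1
      · subst hv1
        rw [if_pos rfl, foldD_shift, foldD_stay w _ _ (by omega) hge]
        rw [if_pos (by push_cast; omega : (1 : Int) - 1 - 1 + 1 < ((ws.length + 1 : Nat) : Int))]
        norm_num
      · rw [if_neg hv1, ih (v - 1) (by omega), foldD_shift]
        push_cast
        by_cases hD : foldD w (timesFrom j 0 ws) (v - 1 - 1) < (ws.length : Int)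
        · rw [if_pos hD, if_pos (by omega)]; rfl
        · rw [if_neg hD, if_neg (by omega)]; rfl

theorem scanB_spec : ∀ (cnts : List Int) (alive : Int),
    scanB alive cnts
      = (List.range cnts.length).map (fun (t : Nat) => alive - ((cnts.take (t + 1)).sum)) := by
  intro cnts
  induction cnts with
  | nil => intro alive; simp [scanB]
  | cons c cnts ih =>
    intro alive
    simp only [scanB, List.length_cons, List.range_succ_eq_map, List.map_cons, List.map_map]
    congr 1
    · simp
    · rw [ih (alive - c)]
      apply List.map_congr_left
      intro t _
      simp only [Function.comp_apply, List.take_succ_cons, List.sum_cons]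
      ring

theorem sum_take_set : ∀ (B : List Int) (iN k : Nat), iN < B.length →
    ((B.set iN (B.getD iN 0 + 1)).take k).sum = (B.take k).sum + (if iN < k then 1 else 0) := by
  intro B
  induction B with
  | nil => intro iN k h; simp at h
  | cons b B ih =>
    intro iN k h
    cases iN with
    | zero =>
      cases k with
      | zero => simp
      | succ k => simp; ring
    | succ iN =>
      cases k with
      | zero => simp
      | succ k =>
        simp only [List.set_cons_succ, List.take_succ_cons, List.sum_cons, List.getD_cons_succ]
        rw [ih iN k (by simpa using h)]
        split_ifs with h1 h2 h2 <;> omega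

theorem bucket_len (m : Nat) : ∀ (ds : List Int) (B : List Int),
    (ds.foldl (fun bk d =>
      PySem.List.pySetD bk (min d (m : Int)) (PySem.List.pyGetD bk (min d (m : Int)) 0 + 1)) B).length
      = B.length := by
  intro ds
  induction ds with
  | nil => intro B; rfl
  | cons d ds ih =>
    intro B
    simp only [List.foldl_cons]
    rw [ih, PySem.List.length_pySetD]

theorem bucket_sum (m : Nat) : ∀ (ds : List Int) (B : List Int) (k : Nat),
    (∀ d ∈ ds, 0 ≤ d) → B.length = m + 1 →
    (((ds.foldl (fun bk d =>
        PySem.List.pySetD bk (min d (m : Int)) (PySem.List.pyGetD bk (min d (m : Int)) 0 + 1)) B)).take k).sum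
      = (B.take k).sum + cntLe ((k : Int) - 1) (ds.map (fun d => min d (m : Int))) := by
  intro ds
  induction ds with
  | nil => intro B k _ _; simp [cntLe]
  | cons d ds ih =>
    intro B k hds hB
    have hd : 0 ≤ d := hds d (by simp)
    have hmin0 : 0 ≤ min d (m : Int) := by omega
    have hminm : min d (m : Int) < (B.length : Int) := by
      rw [hB]; push_cast; omega
    simp only [List.foldl_cons, List.map_cons, cntLe]
    rw [PySem.List.pySetD_of_nonneg _ _ hmin0,
      PySem.List.pyGetD_eq_getElem _ _ hmin0 hminm,
      ← List.getD_eq_getElem _ 0 (by omega : (min d (m : Int)).toNat < B.length)]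
    rw [ih _ k (fun x hx => hds x (by simp [hx])) (by rw [List.length_set]; exact hB)]
    rw [sum_take_set B (min d (m : Int)).toNat k (by omega)]
    have hiff : ((min d (m : Int)).toNat < k) ↔ (min d (m : Int) ≤ (k : Int) - 1) := by omega
    rw [if_congr hiff rfl rfl]
    ring

theorem pass_len (planted : List Int) : ∀ (l : List (Int × Int)) (death : List Int),
    (l.foldl (fun death (tw : Int × Int) =>
      if 0 ≤ tw.2 - 1 ∧ tw.2 - 1 < (planted.length : Int) ∧ 1 ≤ PySem.List.pyGetD planted (tw.2 - 1) 0
          ∧ tw.1 ≤ PySem.List.pyGetD death (tw.2 - 1) 0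
      then PySem.List.pySetD death (tw.2 - 1) (tw.1 + PySem.List.pyGetD planted (tw.2 - 1) 0)
      else death) death).length = death.length := by
  intro l
  induction l with
  | nil => intro death; rfl
  | cons tw l ih =>
    intro death
    simp only [List.foldl_cons]
    rw [ih]
    split_ifs with h
    · rw [PySem.List.length_pySetD]
    · rfl

theorem pass_get (planted : List Int) : ∀ (ws : List Int) (s : Int) (death : List Int),
    death.length = planted.length → ∀ (jn : Nat), jn < planted.length →
    ((PySem.List.enumerate ws s).foldl (fun death (tw : Int × Int) =>
      if 0 ≤ tw.2 - 1 ∧ tw.2 - 1 < (planted.length : Int) ∧ 1 ≤ PySem.List.pyGetD planted (tw.2 - 1) 0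
          ∧ tw.1 ≤ PySem.List.pyGetD death (tw.2 - 1) 0
      then PySem.List.pySetD death (tw.2 - 1) (tw.1 + PySem.List.pyGetD planted (tw.2 - 1) 0)
      else death) death).getD jn 0
      = if 1 ≤ planted.getD jn 0
        then foldD (planted.getD jn 0) (timesFrom (jn : Int) s ws) (death.getD jn 0)
        else death.getD jn 0 := by
  intro ws
  induction ws with
  | nil =>
    intro s death hlen jn hj
    rw [PySem.List.enumerate_nil]
    simp only [List.foldl_nil, timesFrom, foldD]
    split_ifs <;> rfl
  | cons w ws ih =>
    intro s death hlen jn hj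
    rw [PySem.List.enumerate_cons, List.foldl_cons]
    by_cases hw : w - 1 = (jn : Int)
    · -- this watering targets plant jn
      simp only [hw, PySem.List.pyGetD_natCast]
      by_cases h1p : 1 ≤ planted.getD jn 0
      · by_cases hsd : s ≤ death.getD jn 0
        · rw [if_pos ⟨by omega, by omega, h1p, hsd⟩]
          have hset : PySem.List.pySetD death ((jn : Int)) (s + planted.getD jn 0)
              = death.set jn (s + planted.getD jn 0) := by
            rw [PySem.List.pySetD_of_nonneg _ _ (by omega : (0:Int) ≤ (jn:Int))]
            norm_num
          rw [hset, ih (s + 1) _ (by rw [List.length_set]; exact hlen) jn hj]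
          have hget : (death.set jn (s + planted.getD jn 0)).getD jn 0 = s + planted.getD jn 0 := by
            rw [List.getD_eq_getElem _ 0 (by rw [List.length_set]; omega)]
            simp
          rw [hget, if_pos h1p, if_pos h1p]
          simp only [timesFrom]
          rw [show (if w - 1 = (jn : Int) then [s] else []) = [s] from if_pos hw,
            List.singleton_append]
          simp only [foldD]
          rw [if_pos hsd]
        · rw [if_neg (by intro h; exact hsd h.2.2.2)]
          rw [ih (s + 1) death hlen jn hj, if_pos h1p, if_pos h1p]
          simp only [timesFrom]
          rw [show (if w - 1 = (jn : Int) then [s] else []) = [s] from if_pos hw,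
            List.singleton_append]
          simp only [foldD]
          rw [if_neg hsd]
      · rw [if_neg (by intro h; exact h1p h.2.2.1)]
        rw [ih (s + 1) death hlen jn hj, if_neg h1p, if_neg h1p]
    · -- this watering targets some other plant (or none)
      have htimes : timesFrom (jn : Int) s (w :: ws) = timesFrom (jn : Int) (s + 1) ws := by
        simp only [timesFrom]
        rw [show (if w - 1 = (jn : Int) then [s] else []) = ([] : List Int) from if_neg hw,
          List.nil_append]
      by_cases hg : 0 ≤ w - 1 ∧ w - 1 < (planted.length : Int)
          ∧ 1 ≤ PySem.List.pyGetD planted (w - 1) 0 ∧ s ≤ PySem.List.pyGetD death (w - 1) 0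
      · rw [if_pos hg]
        rw [ih (s + 1) _ (by rw [PySem.List.length_pySetD]; exact hlen) jn hj]
        have hgd : (PySem.List.pySetD death (w - 1) (s + PySem.List.pyGetD planted (w - 1) 0)).getD jn 0
            = death.getD jn 0 := by
          rw [PySem.List.pySetD_of_nonneg _ _ hg.1]
          by_cases hjl : jn < death.length
          · rw [List.getD_eq_getElem _ 0 (by rw [List.length_set]; exact hjl),
              List.getD_eq_getElem _ 0 hjl, List.getElem_set_ne (by omega)]
          · rw [List.getD_eq_default _ 0 (by rw [List.length_set]; omega),
              List.getD_eq_default _ 0 (by omega)]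
        rw [hgd, htimes]
      · rw [if_neg hg, ih (s + 1) death hlen jn hj, htimes]

theorem cell_bridge (j p t : Int) (ws : List Int) (htm : t < (ws.length : Int)) :
    (decide ((if 1 ≤ p then foldD p (timesFrom j 0 ws) (p - 1) else (ws.length : Int)) ≤ t))
      = deadBy (dieV j p (ws.map (fun x => x - 1)) p) t := by
  by_cases hp : 1 ≤ p
  · rw [if_pos hp, dieV_foldD j p hp ws p hp]
    by_cases hD : foldD p (timesFrom j 0 ws) (p - 1) < (ws.length : Int)
    · rw [if_pos hD]; rfl
    · rw [if_neg hD]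
      simp only [deadBy, decide_eq_false_iff_not]
      omega
  · rw [if_neg hp, dieV_none j p (by omega) (ws.map (fun x => x - 1)) p (by omega)]
    simp only [deadBy, decide_eq_false_iff_not]
    omega

theorem cnt_bridge (ws : List Int) (t : Int) (htm : t < (ws.length : Int)) :
    ∀ (ps : List Int) (i : Int),
      cntLe t (deathSpec ws (ws.length : Int) i ps)
        = cntDead (ws.map (fun x => x - 1)) t i ps ps (List.replicate ps.length false) := by
  intro ps
  induction ps with
  | nil => intro i; rfl
  | cons p ps ih =>
    intro i
    simp only [deathSpec, cntLe, List.length_cons, List.replicate_succ, cntDead, Bool.false_or]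
    rw [← cell_bridge i p t ws htm]
    simp only [decide_eq_true_eq]
    rw [ih (i + 1)]

theorem deathSpec_len (ws : List Int) (m : Int) : ∀ (ps : List Int) (i : Int),
    (deathSpec ws m i ps).length = ps.length := by
  intro ps
  induction ps with
  | nil => intro i; rfl
  | cons p ps ih => intro i; simp [deathSpec, ih]

theorem deathSpec_getD (ws : List Int) (m : Int) : ∀ (ps : List Int) (i : Int) (jn : Nat),
    jn < ps.length →
    (deathSpec ws m i ps).getD jn 0
      = if 1 ≤ ps.getD jn 0
        then foldD (ps.getD jn 0) (timesFrom (i + jn) 0 ws) (ps.getD jn 0 - 1) else m := by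
  intro ps
  induction ps with
  | nil => intro i jn h; simp at h
  | cons p ps ih =>
    intro i jn h
    cases jn with
    | zero => simp [deathSpec]
    | succ jn =>
      simp only [deathSpec, List.getD_cons_succ]
      rw [ih (i + 1) jn (by simpa using h)]
      have : i + 1 + (jn : Int) = i + ((jn + 1 : Nat) : Int) := by push_cast; ring
      rw [this]

theorem deathSpec_nonneg (ws : List Int) : ∀ (ps : List Int) (i : Int),
    ∀ d ∈ deathSpec ws (ws.length : Int) i ps, 0 ≤ d := by
  intro ps
  induction ps with
  | nil => intro i d h; simp [deathSpec] at h
  | cons p ps ih =>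
    intro i d h
    simp only [deathSpec, List.mem_cons] at h
    rcases h with rfl | h
    · split_ifs with hp
      · exact foldD_nonneg p hp _ _ (by omega) (fun x hx => timesFrom_ge i ws 0 x hx)
      · positivity
    · exact ih (i + 1) d h

theorem cntLe_map_min (m : Nat) : ∀ (ds : List Int), (∀ d ∈ ds, 0 ≤ d) →
    ∀ (t : Int), t < (m : Int) →
      cntLe t (ds.map (fun d => min d (m : Int))) = cntLe t ds := by
  intro ds
  induction ds with
  | nil => intro _ t _; rfl
  | cons d ds ih =>
    intro hds t htm
    have hd : 0 ≤ d := hds d (by simp)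
    simp only [List.map_cons, cntLe]
    rw [ih (fun x hx => hds x (by simp [hx])) t htm,
      if_congr (by omega : min d (m : Int) ≤ t ↔ d ≤ t) rfl rfl]

theorem solution_alt_eq (planted watered : List Int) :
    solution_alt planted watered
      = (List.range watered.length).map (fun (t : Nat) =>
          ((planted.length : Int)) - cntLe (t : Int)
            (deathSpec watered (watered.length : Int) 0 planted)) := by
  simp only [solution_alt]
  have hds : (List.foldl
        (fun death (tw : Int × Int) =>
          if 0 ≤ tw.2 - 1 ∧ tw.2 - 1 < (planted.length : Int)
              ∧ 1 ≤ PySem.List.pyGetD planted (tw.2 - 1) 0 ∧ tw.1 ≤ PySem.List.pyGetD death (tw.2 - 1) 0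
          then PySem.List.pySetD death (tw.2 - 1) (tw.1 + PySem.List.pyGetD planted (tw.2 - 1) 0)
          else death)
        (List.map (fun p => if 1 ≤ p then p - 1 else (watered.length : Int)) planted)
        (PySem.List.enumerate watered))
      = deathSpec watered (watered.length : Int) 0 planted := by
    apply List.ext_getElem
    · rw [pass_len planted _ _, List.length_map, deathSpec_len]
    · intro n1 h1 h2
      have h1' : n1 < planted.length := by
        rwa [pass_len planted _ _, List.length_map] at h1
      rw [← List.getD_eq_getElem _ 0 h1, ← List.getD_eq_getElem _ 0 h2]
      rw [pass_get planted watered 0 _ (by rw [List.length_map]) n1 h1']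
      rw [deathSpec_getD watered _ planted 0 n1 h1', zero_add]
      have hd0 : (List.map (fun p => if 1 ≤ p then p - 1 else (watered.length : Int)) planted).getD n1 0
          = if 1 ≤ planted.getD n1 0 then planted.getD n1 0 - 1 else (watered.length : Int) := by
        rw [List.getD_eq_getElem _ 0 (by simpa using h1'), List.getElem_map,
          List.getD_eq_getElem _ 0 h1']
      rw [hd0]
      split_ifs with h <;> rfl
  rw [hds]
  have hnn : ∀ d ∈ deathSpec watered (watered.length : Int) 0 planted, 0 ≤ d :=
    deathSpec_nonneg watered planted 0
  have hBlen : ((deathSpec watered (watered.length : Int) 0 planted).foldl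
      (fun bk d => PySem.List.pySetD bk (min d (watered.length : Int))
        (PySem.List.pyGetD bk (min d (watered.length : Int)) 0 + 1))
      (List.replicate (watered.length + 1) (0 : Int))).length = watered.length + 1 := by
    rw [bucket_len, List.length_replicate]
  rw [scanB_spec, List.length_take, hBlen, Nat.min_eq_left (by omega)]
  refine List.map_congr_left (fun t ht => ?_)
  rw [List.mem_range] at ht
  rw [List.take_take, Nat.min_eq_left (by omega)]
  rw [bucket_sum watered.length _ _ (t + 1) hnn (by rw [List.length_replicate])]
  have hz : ((List.replicate (watered.length + 1) (0 : Int)).take (t + 1)).sum = 0 := by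
    simp
  rw [hz, zero_add]
  have hc : ((t + 1 : Nat) : Int) - 1 = (t : Int) := by push_cast; ring
  rw [hc, cntLe_map_min watered.length _ hnn (t : Int) (by exact_mod_cast ht)]

-- ===== VERDICT (by name: the statement is the Claim_ definition above) =====
theorem solution_spec : Claim_equal_solution := by
  intro planted watered _
  unfold Spec_solution
  rw [solution_eq, solution_alt_eq]
  refine List.map_congr_left (fun t htmem => ?_)
  rw [List.mem_range] at htmem
  rw [cnt_bridge watered (t : Int) (by exact_mod_cast htmem)]
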